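-- pv_equiv track=rewrite | github.com/AsokTamang/TypeExpress | p.py | solution
-- ===== SOURCE A (Python) =====
-- def calculatecount(p, s, target):
--     totalcount = 0
--     m = []
--     for num in p:
--         m.append(num)
--     for num in s:
--         if target - num in m:
--             totalcount += 1
--     return totalcount
--
-- def solution(primary, secondary, operations):
--     ans = []
--     for operation in operations:
--         if len(operation) == 2:
--             ans.append(calculatecount(primary, secondary, operation[1]))
--         elif len(operation) == 3:
--             targetindex = operation[1]
--             targetvalue = operation[2]
--             secondary[targetindex] = (
--                 targetvalue  # changing the value of secondary array using the target index and value from the current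
--             )
--     return ans
-- ===== SOURCE B (Python) =====
-- def solution(primary, secondary, operations):
--     keys = set(primary)
--     freq = {}
--     for num in secondary:
--         freq[num] = freq.get(num, 0) + 1
--     ans = []
--     for op in operations:
--         if len(op) == 2:
--             ans.append(sum(freq.get(op[1] - v, 0) for v in keys))
--         elif len(op) == 3:
--             index = op[1]
--             old = secondary[index]
--             freq[old] -= 1
--             new = op[2]
--             freq[new] = freq.get(new, 0) + 1
--             secondary[index] = new
--     return ans
-- ===== Notes on version B (the rewrite author's own statement) =====
-- stated objective: alternative
-- what changed: B maintains a frequency dict of secondary incrementally across the update operations (adjusting two entries per update) and answers each length-2 query by summing frequencies of target-v over the distinct primary values, instead of A's per-query rescan of secondary with a membership test in a fresh copy of primary.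
import Mathlib
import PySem

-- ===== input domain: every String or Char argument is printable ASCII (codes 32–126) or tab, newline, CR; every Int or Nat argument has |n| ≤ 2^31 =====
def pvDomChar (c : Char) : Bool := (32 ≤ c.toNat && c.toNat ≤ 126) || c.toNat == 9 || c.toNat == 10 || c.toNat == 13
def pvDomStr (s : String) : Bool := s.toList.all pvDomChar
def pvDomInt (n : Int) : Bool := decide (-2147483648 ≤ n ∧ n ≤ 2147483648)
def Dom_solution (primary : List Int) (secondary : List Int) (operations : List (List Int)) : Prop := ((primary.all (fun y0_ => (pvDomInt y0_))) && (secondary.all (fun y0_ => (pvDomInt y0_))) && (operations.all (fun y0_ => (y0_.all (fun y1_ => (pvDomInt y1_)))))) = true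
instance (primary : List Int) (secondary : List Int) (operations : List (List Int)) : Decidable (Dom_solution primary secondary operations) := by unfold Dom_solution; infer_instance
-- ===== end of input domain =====

-- B maintains a frequency dict of the current secondary INCREMENTALLY across the update
-- operations and answers each length-2 query by summing the frequencies of target-v over the
-- distinct primary values, instead of A's per-query scan of secondary with a membership test
-- in a fresh copy of primary; both Pythons mutate `secondary` in place identically, and the
-- equivalence proved is about the return value.

-- ===== PORT A =====
def calculatecount (p : List Int) (s : List Int) (target : Int) : Int :=
  let m := p.foldl (fun m num => m ++ [num]) []
  s.foldl (fun totalcount num => if (target - num) ∈ m then totalcount + 1 else totalcount) 0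

def solution (primary : List Int) (secondary : List Int) (operations : List (List Int)) : List Int :=
  (operations.foldl (fun st operation =>
      if operation.length = 2 then
        (st.1, st.2 ++ [calculatecount primary st.1 (PySem.List.pyGetD operation 1 0)])
      else if operation.length = 3 then
        (PySem.List.pySetD st.1 (PySem.List.pyGetD operation 1 0) (PySem.List.pyGetD operation 2 0), st.2)
      else st)
    (secondary, ([] : List Int))).2

-- ===== PORT B =====
def stepB (keys : List Int) (st : List Int × PySem.Dict Int Int × List Int) (op : List Int) :
    List Int × PySem.Dict Int Int × List Int :=
  if op.length = 2 then
    (st.1, st.2.1, st.2.2 ++ [(keys.map (fun v => st.2.1.getD (PySem.List.pyGetD op 1 0 - v) 0)).sum])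
  else if op.length = 3 then
    let index := PySem.List.pyGetD op 1 0
    let old := PySem.List.pyGetD st.1 index 0
    let freq1 := st.2.1.insert old (st.2.1.getD old 0 - 1)
    let nw := PySem.List.pyGetD op 2 0
    let freq2 := freq1.insert nw (freq1.getD nw 0 + 1)
    (PySem.List.pySetD st.1 index nw, freq2, st.2.2)
  else st

def solution_alt (primary : List Int) (secondary : List Int) (operations : List (List Int)) : List Int :=
  let keys := PySem.Set.ofList primary
  let freq := secondary.foldl (fun d num => d.insert num (d.getD num 0 + 1)) (PySem.Dict.empty : PySem.Dict Int Int)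
  (operations.foldl (stepB keys) (secondary, freq, ([] : List Int))).2.2

-- ===== PRECONDITION & SPEC =====
-- A raises IndexError on a length-3 operation whose index is out of range (secondary's length
-- never changes, so this is a closed-form condition on the inputs); Pre_ excludes exactly those.
def Pre_solution (primary : List Int) (secondary : List Int) (operations : List (List Int)) : Prop :=
  ∀ op ∈ operations, op.length = 3 → PySem.Raise.InRange secondary.length (PySem.List.pyGetD op 1 0)
instance (primary : List Int) (secondary : List Int) (operations : List (List Int)) : Decidable (Pre_solution primary secondary operations) := by unfold Pre_solution; infer_instance
def pvWitness_solution : List Int × List Int × List (List Int) := ([1, 2, 2], [3, 1], [[0, 3], [9, 0, 5], [0, 4]])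

def Spec_solution (primary : List Int) (secondary : List Int) (operations : List (List Int)) (out : List Int) : Prop := out = solution_alt primary secondary operations
instance (primary : List Int) (secondary : List Int) (operations : List (List Int)) (out : List Int) : Decidable (Spec_solution primary secondary operations out) := by unfold Spec_solution; infer_instance

-- ===== CLAIM (what is proved, stated in full; the proofs are below) =====
def Claim_equal_solution : Prop := ∀ (primary : List Int) (secondary : List Int) (operations : List (List Int)), Dom_solution primary secondary operations → Pre_solution primary secondary operations → Spec_solution primary secondary operations (solution primary secondary operations)

-- ===== LEMMAS AND PROOFS =====

-- sum over a duplicate-free list of a 0/1 indicator of equality is a membership test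
theorem sum_ite_eq_of_nodup (l : List Int) (c : Int) (h : l.Nodup) :
    (l.map (fun v => if v = c then (1 : Int) else 0)).sum = if c ∈ l then 1 else 0 := by
  induction l with
  | nil => simp
  | cons x xs ih =>
    simp only [List.map_cons, List.sum_cons, List.mem_cons]
    rcases List.nodup_cons.mp h with ⟨hx, hnd⟩
    rw [ih hnd]
    by_cases hxc : x = c
    · subst hxc; simp [hx]
    · simp [hxc, Ne.symm hxc]

-- A's count equals the distinct-primary sum of occurrence counts in s
theorem count_eq (p s : List Int) (t : Int) :
    calculatecount p s t
      = ((PySem.Set.ofList p).map (fun v => ((s.count (t - v) : Nat) : Int))).sum := by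
  unfold calculatecount
  simp only [PySem.List.foldl_append_singleton, List.nil_append, PySem.List.foldl_ite_add_one, zero_add]
  induction s with
  | nil => simp
  | cons num s ih =>
    have hc : ∀ v : Int, (((num :: s).count (t - v) : Int))
        = (s.count (t - v) : Int) + (if v = t - num then (1 : Int) else 0) := by
      intro v
      rw [List.count_cons]
      by_cases h : v = t - num
      · have h2 : t - v = num := by omega
        simp [h]
      · have h2 : ¬ num = t - v := by omega
        simp [h, h2]
    simp only [List.countP_cons, hc]
    rw [PySem.List.sum_map_add_int, sum_ite_eq_of_nodup _ _ (PySem.Set.nodup_ofList p), ← ih]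
    by_cases hm : t - num ∈ p
    · simp [hm, PySem.Set.mem_ofList]
    · simp [hm, PySem.Set.mem_ofList]

-- counting in a list after setting one in-range position
theorem count_set_int (xs : List Int) (n : Nat) (x v : Int) (h : n < xs.length) :
    (((xs.set n x).count v : Nat) : Int)
      = (xs.count v : Int) - (if xs[n] = v then 1 else 0) + (if x = v then 1 else 0) := by
  induction xs generalizing n with
  | nil => simp at h
  | cons y ys ih =>
    cases n with
    | zero =>
      simp only [List.set_cons_zero, List.count_cons, List.getElem_cons_zero]
      push_cast
      by_cases h1 : x = v <;> by_cases h2 : y = v <;> simp [h1, h2]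
    | succ m =>
      have hm : m < ys.length := by simpa using h
      simp only [List.set_cons_succ, List.count_cons, List.getElem_cons_succ]
      push_cast [ih m hm]
      by_cases h1 : y = v <;> simp [h1] <;> omega

-- normalising a Python in-range index: pySetD is List.set and pyGetD is getElem there
theorem py_norm (xs : List Int) (i x d : Int) (h : PySem.Raise.InRange xs.length i) :
    ∃ (n : Nat) (hn : n < xs.length), PySem.List.pySetD xs i x = xs.set n x
      ∧ PySem.List.pyGetD xs i d = xs[n]'hn := by
  simp only [PySem.Raise.InRange] at h
  by_cases h0 : 0 ≤ i
  · have hn : i.toNat < xs.length := by omega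
    refine ⟨i.toNat, hn, ?_, ?_⟩
    · simp only [PySem.List.pySetD, PySem.List.pySet?, PySem.List.pyIdx?]
      rw [if_pos h0, if_pos h.2]
      simp
    · simp only [PySem.List.pyGetD, PySem.List.pyGet?, PySem.List.pyIdx?]
      rw [if_pos h0, if_pos h.2]
      simp [List.getElem?_eq_getElem hn]
  · have hn : xs.length - (-i).toNat < xs.length := by omega
    refine ⟨xs.length - (-i).toNat, hn, ?_, ?_⟩
    · simp only [PySem.List.pySetD, PySem.List.pySet?, PySem.List.pyIdx?]
      rw [if_neg h0, if_pos h.1]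
      simp
    · simp only [PySem.List.pyGetD, PySem.List.pyGet?, PySem.List.pyIdx?]
      rw [if_neg h0, if_pos h.1]
      simp [List.getElem?_eq_getElem hn]

-- the frequency-dict update performed on a length-3 operation preserves the counter invariant
theorem upd_inv (sec : List Int) (freq : PySem.Dict Int Int) (n : Nat) (hn : n < sec.length)
    (nw old : Int) (hold : sec[n]'hn = old)
    (hinv : ∀ v : Int, freq.getD v 0 = ((sec.count v : Nat) : Int)) :
    ∀ v : Int, (((freq.insert old (freq.getD old 0 - 1)).insert nw
        ((freq.insert old (freq.getD old 0 - 1)).getD nw 0 + 1)).getD v 0)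
      = (((sec.set n nw).count v : Nat) : Int) := by
  intro v
  simp only [PySem.Dict.getD_insert, hinv]
  rw [count_set_int sec n nw v hn, hold]
  split_ifs <;> subst_vars <;> omega

-- the initial dict is the counter of secondary
theorem init_counter (s : List Int) (v : Int) :
    (s.foldl (fun d num => d.insert num (d.getD num 0 + 1)) (PySem.Dict.empty : PySem.Dict Int Int)).getD v 0
      = ((s.count v : Nat) : Int) := by
  rw [PySem.Dict.getD_foldl_insert_add_one]
  simp

-- main loop invariant: if freq agrees with the counter of sec, the two folds produce the same answers
theorem loop_eq (primary : List Int) (ops : List (List Int)) :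
    ∀ (sec : List Int) (ans : List Int) (freq : PySem.Dict Int Int),
    (∀ v : Int, freq.getD v 0 = ((sec.count v : Nat) : Int)) →
    (∀ op ∈ ops, op.length = 3 → PySem.Raise.InRange sec.length (PySem.List.pyGetD op 1 0)) →
    (ops.foldl (fun st operation =>
        if operation.length = 2 then
          (st.1, st.2 ++ [calculatecount primary st.1 (PySem.List.pyGetD operation 1 0)])
        else if operation.length = 3 then
          (PySem.List.pySetD st.1 (PySem.List.pyGetD operation 1 0) (PySem.List.pyGetD operation 2 0), st.2)
        else st)
      (sec, ans)).2
    = (ops.foldl (stepB (PySem.Set.ofList primary)) (sec, freq, ans)).2.2 := by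
  induction ops with
  | nil => intro sec ans freq _ _; rfl
  | cons op rest ih =>
    intro sec ans freq hinv hpre
    simp only [List.foldl_cons]
    by_cases h2 : op.length = 2
    · simp only [stepB, if_pos h2]
      have hq : (PySem.Set.ofList primary).map (fun v => freq.getD (PySem.List.pyGetD op 1 0 - v) 0)
           = (PySem.Set.ofList primary).map (fun v => ((sec.count (PySem.List.pyGetD op 1 0 - v) : Nat) : Int)) := by
        simp [hinv]
      rw [count_eq, ← hq]
      exact ih sec _ freq hinv (fun o ho => hpre o (List.mem_cons_of_mem _ ho))
    · by_cases h3 : op.length = 3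
      · simp only [stepB, if_neg h2, if_pos h3]
        obtain ⟨n, hn, hset, hget⟩ := py_norm sec (PySem.List.pyGetD op 1 0) (PySem.List.pyGetD op 2 0) 0
          (hpre op List.mem_cons_self h3)
        rw [hset, hget]
        apply ih
        · exact upd_inv sec freq n hn _ _ rfl hinv
        · intro o ho hl
          have := hpre o (List.mem_cons_of_mem _ ho) hl
          simpa [List.length_set] using this
      · simp only [stepB, if_neg h2, if_neg h3]
        exact ih sec ans freq hinv (fun o ho => hpre o (List.mem_cons_of_mem _ ho))

-- ===== VERDICT (by name: the statement is the Claim_ definition above) =====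
theorem solution_spec : Claim_equal_solution := by
  intro primary secondary operations _ hpre
  unfold Spec_solution solution solution_alt
  exact loop_eq primary operations secondary [] _ (init_counter secondary) hpre
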